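-- pv_equiv track=rewrite | github.com/germainPoloudenny/deCIFer | bin/prepare_dataset.py | _truncate_tokens_after_formula_line
-- ===== SOURCE A (Python) =====
-- FORMULA_TOKENS = (
--     "_chemical_formula_sum",
--     "_chemical_formula_structural",
-- )
--
-- def _truncate_tokens_after_formula_line(tokens):
--     """
--     Truncate the token sequence immediately after the first chemical formula line.
--
--     The tokenizer emits newline tokens as separate entries. We keep everything up to
--     and including the first newline that follows either `_chemical_formula_sum` or
--     `_chemical_formula_structural`. If neither keyword is present, the sequence is
--     left untouched.
--     """
--     formula_indices = []
--     for key in FORMULA_TOKENS: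
--         try:
--             idx = tokens.index(key)
--         except ValueError:
--             continue
--         else:
--             formula_indices.append(idx)
--
--     if not formula_indices:
--         return tokens
--
--     first_formula_idx = min(formula_indices)
--     try:
--         newline_idx = tokens.index("\n", first_formula_idx)
--     except ValueError:
--         # No newline afterwards; keep the original sequence.
--         return tokens
--
--     return tokens[: newline_idx + 1]
-- ===== SOURCE B (Python) =====
-- FORMULA_TOKENS = (
--     "_chemical_formula_sum",
--     "_chemical_formula_structural",
-- )
--
-- def _truncate_tokens_after_formula_line(tokens):
--     # Single stateful pass: remember whether a formula keyword has been seen;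
--     # cut right after the first newline token that follows it.
--     seen = False
--     for i, tok in enumerate(tokens):
--         if seen and tok == "\n":
--             return tokens[: i + 1]
--         if tok in FORMULA_TOKENS:
--             seen = True
--     return tokens
-- ===== Notes on version B (the rewrite author's own statement) =====
-- stated objective: simpler
-- what changed: Replaces the three separate .index scans (two keyword lookups plus a newline search) and the min over collected indices with one stateful left-to-right pass that flips a seen-formula flag and cuts at the first newline after it.
import Mathlib
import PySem

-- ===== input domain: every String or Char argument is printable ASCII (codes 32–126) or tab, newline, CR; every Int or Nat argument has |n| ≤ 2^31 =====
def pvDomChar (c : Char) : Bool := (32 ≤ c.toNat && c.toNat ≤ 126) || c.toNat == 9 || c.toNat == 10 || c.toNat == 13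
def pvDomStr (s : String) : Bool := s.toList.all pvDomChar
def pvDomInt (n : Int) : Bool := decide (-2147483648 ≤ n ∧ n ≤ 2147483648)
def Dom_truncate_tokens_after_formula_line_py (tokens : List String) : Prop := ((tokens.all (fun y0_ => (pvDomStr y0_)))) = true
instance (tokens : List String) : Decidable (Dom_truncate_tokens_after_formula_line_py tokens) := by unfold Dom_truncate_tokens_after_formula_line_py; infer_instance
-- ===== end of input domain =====

-- B replaces A's three separate index scans + min with one stateful pass over the tokens (objective: simpler).


-- ===== PORT A =====
def FORMULA_TOKENS : List String := ["_chemical_formula_sum", "_chemical_formula_structural"]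

def truncate_tokens_after_formula_line_py (tokens : List String) : List String :=
  let formula_indices : List Nat := FORMULA_TOKENS.foldl (fun acc key =>
      match PySem.List.index? tokens key with
      | none => acc                       -- except ValueError: continue
      | some idx => acc ++ [idx]) []      -- formula_indices.append(idx)
  match PySem.List.min? formula_indices (fun x => x) with
  | none => tokens                        -- if not formula_indices: return tokens
  | some first_formula_idx =>
    -- tokens.index("\n", first_formula_idx): hand-ported (PySem has no list.index with a start
    -- argument); exact for the nonnegative start used here: Python returns the absolute index of
    -- the first "\n" at position ≥ start, or raises ValueError (the `none` branch).
    match (PySem.List.index? (tokens.drop first_formula_idx) "\n").map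
        (fun j => first_formula_idx + j) with
    | none => tokens                      -- except ValueError: return tokens
    | some newline_idx => PySem.List.slice tokens none (some ((newline_idx : Int) + 1))

-- ===== PORT B =====
-- the loop of Source B: `pre` is tokens[:i], `rest` the tokens from index i on, `seen` the flag
def truncAltGo (pre : List String) (rest : List String) (seen : Bool) : List String :=
  match rest with
  | [] => pre                             -- loop finished without returning: return tokens (= pre here)
  | t :: ts =>
    if seen && t == "\n" then pre ++ [t]  -- return tokens[: i + 1]
    else truncAltGo (pre ++ [t]) ts (seen || FORMULA_TOKENS.contains t)

def truncate_tokens_after_formula_line_py_alt (tokens : List String) : List String :=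
  truncAltGo [] tokens false

-- ===== PRECONDITION & SPEC =====
def Spec_truncate_tokens_after_formula_line_py (tokens : List String) (out : List String) : Prop := out = truncate_tokens_after_formula_line_py_alt tokens
instance (tokens : List String) (out : List String) : Decidable (Spec_truncate_tokens_after_formula_line_py tokens out) := by unfold Spec_truncate_tokens_after_formula_line_py; infer_instance

-- ===== CLAIM (what is proved, stated in full; the proofs are below) =====
def Claim_equal_truncate_tokens_after_formula_line_py : Prop := ∀ (tokens : List String), Dom_truncate_tokens_after_formula_line_py tokens → Spec_truncate_tokens_after_formula_line_py tokens (truncate_tokens_after_formula_line_py tokens)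

-- ===== LEMMAS AND PROOFS =====

-- the newline-search-then-slice tail of A, rephrased with List.take
lemma trunc_slice_tail (first : Nat) (tokens : List String) :
    (match (PySem.List.index? (tokens.drop first) "\n").map (fun j => first + j) with
     | none => tokens
     | some newline_idx => PySem.List.slice tokens none (some ((newline_idx : Int) + 1)))
    = (match PySem.List.index? (tokens.drop first) "\n" with
       | none => tokens
       | some j => tokens.take (first + j + 1)) := by
  cases h : PySem.List.index? (tokens.drop first) "\n" with
  | none => simp only [Option.map_none]
  | some j =>
    simp only [Option.map_some]
    rw [show ((first + j : Nat) : Int) + 1 = ((first + j + 1 : Nat) : Int) from by push_cast; ring]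
    rw [PySem.List.slice_to_natCast]

lemma truncAltGo_prefix (l : List String) : ∀ (pre : List String) (s : Bool),
    truncAltGo pre l s = pre ++ truncAltGo [] l s := by
  induction l with
  | nil => intro pre s; simp [truncAltGo]
  | cons t ts ih =>
    intro pre s
    simp only [truncAltGo]
    by_cases h : (s && t == "\n") = true
    · simp [h]
    · simp only [h, if_false, Bool.false_eq_true, List.nil_append]
      rw [ih (pre ++ [t]), ih [t]]
      simp

lemma truncAltGo_true (l : List String) :
    truncAltGo [] l true =
      (match PySem.List.index? l "\n" with
       | none => l
       | some j => l.take (j + 1)) := by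
  induction l with
  | nil => simp [truncAltGo, PySem.List.index?_eq_idxOf?]
  | cons t ts ih =>
    by_cases ht : t = "\n"
    · subst ht
      rw [PySem.List.index?_cons_self]
      simp [truncAltGo]
    · rw [PySem.List.index?_cons_of_ne _ ht]
      simp only [truncAltGo, Bool.true_and, beq_iff_eq, ht, if_false, List.nil_append,
        Bool.true_or]
      rw [truncAltGo_prefix ts [t] true, ih]
      cases h : PySem.List.index? ts "\n" with
      | none => simp
      | some j => simp [List.take_succ_cons]

-- a non-keyword head passes through A unchanged
lemma A_cons_of_not_mem (t : String) (ts : List String) (ht : t ∉ FORMULA_TOKENS) :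
    truncate_tokens_after_formula_line_py (t :: ts) =
      t :: truncate_tokens_after_formula_line_py ts := by
  have ht1 : t ≠ "_chemical_formula_sum" := fun h => ht (by rw [h]; simp [FORMULA_TOKENS])
  have ht2 : t ≠ "_chemical_formula_structural" := fun h => ht (by rw [h]; simp [FORMULA_TOKENS])
  simp only [truncate_tokens_after_formula_line_py, FORMULA_TOKENS, List.foldl,
    trunc_slice_tail]
  rw [PySem.List.index?_cons_of_ne _ ht1, PySem.List.index?_cons_of_ne _ ht2]
  cases h1 : PySem.List.index? ts "_chemical_formula_sum" with
  | none =>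
    cases h2 : PySem.List.index? ts "_chemical_formula_structural" with
    | none => simp [PySem.List.min?]
    | some b =>
      simp only [Option.map_none, Option.map_some, List.nil_append]
      rw [PySem.List.min?_id_cons, PySem.List.min?_id_cons]
      simp only [List.foldl, List.drop_succ_cons]
      cases hn : PySem.List.index? (ts.drop b) "\n" with
      | none => rfl
      | some j =>
        show List.take (b + 1 + j + 1) (t :: ts) = t :: List.take (b + j + 1) ts
        rw [show b + 1 + j + 1 = (b + j + 1) + 1 from by omega, List.take_succ_cons]
  | some a =>
    cases h2 : PySem.List.index? ts "_chemical_formula_structural" with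
    | none =>
      simp only [Option.map_none, Option.map_some, List.nil_append]
      rw [PySem.List.min?_id_cons, PySem.List.min?_id_cons]
      simp only [List.foldl, List.drop_succ_cons]
      cases hn : PySem.List.index? (ts.drop a) "\n" with
      | none => rfl
      | some j =>
        show List.take (a + 1 + j + 1) (t :: ts) = t :: List.take (a + j + 1) ts
        rw [show a + 1 + j + 1 = (a + j + 1) + 1 from by omega, List.take_succ_cons]
    | some b =>
      simp only [Option.map_some, List.nil_append, List.cons_append]
      rw [PySem.List.min?_id_cons, PySem.List.min?_id_cons]
      simp only [List.foldl]
      rw [show min (a + 1) (b + 1) = min a b + 1 from by omega]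
      simp only [List.drop_succ_cons]
      cases hn : PySem.List.index? (ts.drop (min a b)) "\n" with
      | none => rfl
      | some j =>
        show List.take (min a b + 1 + j + 1) (t :: ts) = t :: List.take (min a b + j + 1) ts
        rw [show min a b + 1 + j + 1 = (min a b + j + 1) + 1 from by omega, List.take_succ_cons]

-- a keyword head makes A cut right after the first newline of the tail
lemma A_cons_of_mem (t : String) (ts : List String) (ht : t ∈ FORMULA_TOKENS) :
    truncate_tokens_after_formula_line_py (t :: ts) =
      (match PySem.List.index? ts "\n" with
       | none => t :: ts
       | some j => t :: ts.take (j + 1)) := by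
  have htn : t ≠ "\n" := by
    rcases (by simpa [FORMULA_TOKENS] using ht) with h | h <;> subst h <;> decide
  have hmin : PySem.List.min?
      ((FORMULA_TOKENS.foldl (fun acc key =>
        match PySem.List.index? (t :: ts) key with
        | none => acc
        | some idx => acc ++ [idx]) []) : List Nat) (fun x => x) = some 0 := by
    rcases (by simpa [FORMULA_TOKENS] using ht) with h | h <;> subst h
    · simp only [FORMULA_TOKENS, List.foldl]
      rw [PySem.List.index?_cons_self, PySem.List.index?_cons_of_ne _ (by decide)]
      cases h2 : PySem.List.index? ts "_chemical_formula_structural" with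
      | none =>
        simp only [Option.map_none, List.nil_append]
        rw [PySem.List.min?_id_cons]; simp
      | some b =>
        simp only [Option.map_some, List.nil_append, List.cons_append]
        rw [PySem.List.min?_id_cons]
        simp [List.foldl]
    · simp only [FORMULA_TOKENS, List.foldl]
      rw [PySem.List.index?_cons_self, PySem.List.index?_cons_of_ne _ (by decide)]
      cases h1 : PySem.List.index? ts "_chemical_formula_sum" with
      | none =>
        simp only [Option.map_none, List.nil_append]
        rw [PySem.List.min?_id_cons]; simp
      | some a =>
        simp only [Option.map_some, List.nil_append, List.cons_append]
        rw [PySem.List.min?_id_cons]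
        simp [List.foldl]
  simp only [truncate_tokens_after_formula_line_py, trunc_slice_tail]
  rw [hmin]
  simp only [List.drop_zero]
  rw [PySem.List.index?_cons_of_ne _ htn]
  cases hn : PySem.List.index? ts "\n" with
  | none => rfl
  | some j =>
    simp only [Option.map_some, Nat.zero_add]
    rw [List.take_succ_cons]

lemma trunc_main_equiv (tokens : List String) :
    truncate_tokens_after_formula_line_py tokens =
      truncate_tokens_after_formula_line_py_alt tokens := by
  induction tokens with
  | nil => decide
  | cons t ts ih =>
    by_cases ht : t ∈ FORMULA_TOKENS
    · have htn : t ≠ "\n" := by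
        rcases (by simpa [FORMULA_TOKENS] using ht) with h | h <;> subst h <;> decide
      have hc : FORMULA_TOKENS.contains t = true := by
        simpa [List.contains_eq_mem] using ht
      rw [A_cons_of_mem t ts ht]
      simp only [truncate_tokens_after_formula_line_py_alt, truncAltGo, Bool.false_and,
        Bool.false_eq_true, if_false, hc, Bool.false_or, List.nil_append]
      rw [truncAltGo_prefix ts [t] _, truncAltGo_true]
      cases PySem.List.index? ts "\n" with
      | none => rfl
      | some j => rfl
    · have hc : FORMULA_TOKENS.contains t = false := by
        simp only [List.contains_eq_mem]; exact decide_eq_false ht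
      rw [A_cons_of_not_mem t ts ht, ih]
      simp only [truncate_tokens_after_formula_line_py_alt, truncAltGo, Bool.false_and,
        Bool.false_eq_true, if_false, hc, Bool.false_or, List.nil_append]
      rw [truncAltGo_prefix ts [t] _]
      rfl

-- ===== VERDICT (by name: the statement is the Claim_ definition above) =====
theorem truncate_tokens_after_formula_line_py_spec : Claim_equal_truncate_tokens_after_formula_line_py := by
  intro tokens _
  exact trunc_main_equiv tokens
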